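-- pv_equiv track=rewrite | github.com/txemi/immich-autotag | immich_autotag/api/logging_proxy/server/get_server_version.py | _normalize_semver
-- ===== SOURCE A (Python) =====
-- def _normalize_semver(version_text: str) -> str:
--     value = version_text.strip()
--     if value.startswith("v"):
--         value = value[1:]
--     for sep in ("+", "-"):
--         if sep in value:
--             value = value.split(sep, 1)[0]
--     return value
-- ===== SOURCE B (Python) =====
-- def _normalize_semver(version_text: str) -> str:
--     value = version_text.strip()
--     if value.startswith("v"):
--         value = value[1:]
--     cut = len(value)
--     for i, ch in enumerate(value):
--         if ch == "+" or ch == "-":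
--             cut = i
--             break
--     return value[:cut]
-- ===== Notes on version B (the rewrite author's own statement) =====
-- stated objective: simpler
-- what changed: Replaced the two sequential split-and-take-first passes (one per separator) with a single left-to-right scan that records the index of the earliest separator and slices once; no speed claim.
import Mathlib
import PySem

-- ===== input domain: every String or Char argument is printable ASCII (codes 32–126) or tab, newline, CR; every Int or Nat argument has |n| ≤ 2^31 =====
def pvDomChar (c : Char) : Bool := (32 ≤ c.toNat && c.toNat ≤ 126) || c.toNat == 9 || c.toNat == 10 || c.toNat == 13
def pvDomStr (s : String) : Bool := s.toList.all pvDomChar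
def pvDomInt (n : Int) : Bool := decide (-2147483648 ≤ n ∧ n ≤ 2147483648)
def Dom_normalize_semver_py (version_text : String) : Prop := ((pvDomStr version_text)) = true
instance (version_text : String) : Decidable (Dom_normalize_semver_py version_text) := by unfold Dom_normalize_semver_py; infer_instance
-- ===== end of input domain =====

-- B replaces A's two sequential split(sep,1)[0] passes by one scan that cuts at the
-- first '+' or '-'; objective: simpler (single pass, single slice).

-- ===== PORT A =====
-- value = value.split(sep, 1)[0]  (sep ≠ "", so splitMax? is some and nonempty)
def pySplitHead (v sep : String) : String :=
  ((PySem.Str.splitMax? v sep 1).getD []).headD ""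

def normalize_semver_py (version_text : String) : String :=
  let value := PySem.Str.strip version_text
  let value := if PySem.Str.startswith value "v" then PySem.Str.slice value (some 1) none else value
  ["+", "-"].foldl (fun v sep => if PySem.Str.isIn sep v then pySplitHead v sep else v) value

-- ===== PORT B =====
-- for i, ch in enumerate(value): if ch in '+-': cut = i; break  (default cut = len(value))
def cutScan : List Char → Nat
  | [] => 0
  | c :: rest => if c = '+' ∨ c = '-' then 0 else 1 + cutScan rest

def normalize_semver_py_alt (version_text : String) : String :=
  let value := PySem.Str.strip version_text
  let value := if PySem.Str.startswith value "v" then PySem.Str.slice value (some 1) none else value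
  PySem.Str.slice value none (some ((cutScan value.toList : Nat) : Int))

-- ===== PRECONDITION & SPEC =====
def Spec_normalize_semver_py (version_text : String) (out : String) : Prop := out = normalize_semver_py_alt version_text
instance (version_text : String) (out : String) : Decidable (Spec_normalize_semver_py version_text out) := by unfold Spec_normalize_semver_py; infer_instance

-- ===== CLAIM (what is proved, stated in full; the proofs are below) =====
def Claim_equal_normalize_semver_py : Prop := ∀ (version_text : String), Dom_normalize_semver_py version_text → Spec_normalize_semver_py version_text (normalize_semver_py version_text)

-- ===== LEMMAS AND PROOFS =====

-- m = 0: go returns immediately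
theorem go_m0 (c : Char) (fuel : Nat) (l cur : List Char) (acc : List (List Char)) :
    PySem.Chars.splitOnMax.go [c] fuel 0 l cur acc = ((cur.reverse ++ l) :: acc).reverse := by
  cases fuel with
  | zero => rfl
  | succ f => cases l with
    | nil => simp [PySem.Chars.splitOnMax.go]
    | cons x xs => simp [PySem.Chars.splitOnMax.go]

-- m = 1: the pieces produced by go, by induction on l
theorem go_m1 (c : Char) : ∀ (l : List Char) (fuel : Nat) (cur : List Char) (acc : List (List Char)),
    l.length < fuel →
    PySem.Chars.splitOnMax.go [c] fuel 1 l cur acc =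
      acc.reverse ++ [cur.reverse ++ l.takeWhile (· ≠ c)] ++
        (if c ∈ l then [(l.dropWhile (· ≠ c)).tail] else []) := by
  intro l
  induction l with
  | nil =>
    intro fuel cur acc h
    cases fuel with
    | zero => omega
    | succ f => simp [PySem.Chars.splitOnMax.go]
  | cons x xs ih =>
    intro fuel cur acc h
    cases fuel with
    | zero => omega
    | succ f =>
      by_cases hx : x = c
      · subst hx
        simp only [PySem.Chars.splitOnMax.go, List.isPrefixOf, beq_self_eq_true, Bool.true_and,
          List.isPrefixOf_nil_left, if_true, if_neg (one_ne_zero)]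
        rw [go_m0]
        simp [List.takeWhile, List.dropWhile]
      · have hpre : List.isPrefixOf [c] (x :: xs) = false := by
          simp [List.isPrefixOf]; exact fun h => absurd h.symm hx
        simp only [PySem.Chars.splitOnMax.go, hpre, if_neg (one_ne_zero), Bool.false_eq_true,
          if_false]
        rw [ih f (x :: cur) acc (by simpa using Nat.lt_of_succ_lt_succ h)]
        simp [List.takeWhile, List.dropWhile, hx, List.mem_cons,
          show (c = x ∨ c ∈ xs) ↔ c ∈ xs from ⟨fun h' => h'.elim (fun e => absurd e.symm hx) id, Or.inr⟩]

-- One A-step on the list level: split(sep,1)[0] with a single-char sep that occurs is takeWhile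
theorem splitHead_eq_takeWhile (v : String) (c : Char) (hc : c ∈ v.toList) :
    (pySplitHead v (String.ofList [c])).toList = v.toList.takeWhile (· ≠ c) := by
  unfold pySplitHead
  unfold PySem.Str.splitMax? PySem.Chars.splitMax?
  rw [String.toList_ofList]
  simp only [List.isEmpty_cons, Bool.false_eq_true, if_false]
  unfold PySem.Chars.splitOnMax
  rw [if_neg (by norm_num)]
  rw [show Int.toNat 1 = 1 from rfl]
  rw [go_m1 c v.toList (v.toList.length + 1) [] [] (by omega)]
  simp [hc]

-- isIn with a single-char needle is list membership
theorem isIn_single_iff (c : Char) (v : String) :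
    PySem.Str.isIn (String.ofList [c]) v = true ↔ c ∈ v.toList := by
  rw [PySem.Str.isIn_iff_infix]
  constructor
  · intro h; exact h.mem (by simp)
  · intro h
    rcases List.mem_iff_append.mp h with ⟨s, t, hst⟩
    exact ⟨s, t, by simp [hst]⟩

-- An A-step equals takeWhile unconditionally (if c absent, takeWhile is the identity)
theorem step_eq_takeWhile (v : String) (c : Char) :
    ((if PySem.Str.isIn (String.ofList [c]) v then pySplitHead v (String.ofList [c]) else v)).toList
      = v.toList.takeWhile (· ≠ c) := by
  by_cases h : c ∈ v.toList
  · rw [if_pos ((isIn_single_iff c v).mpr h), splitHead_eq_takeWhile v c h]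
  · rw [if_neg (fun hc => h ((isIn_single_iff c v).mp hc)), List.takeWhile_eq_self_iff.mpr]
    intro x hx
    simp only [ne_eq, decide_eq_true_eq]
    exact fun hxc => h (hxc ▸ hx)
  
-- The two nested takeWhiles are B's single cut
theorem takeWhile_takeWhile_eq_take_cutScan : ∀ (l : List Char),
    (l.takeWhile (· ≠ '+')).takeWhile (· ≠ '-') = l.take (cutScan l) := by
  intro l
  induction l with
  | nil => rfl
  | cons x xs ih =>
    by_cases hp : x = '+'
    · subst hp; simp [List.takeWhile, cutScan]
    · by_cases hm : x = '-'
      · subst hm; simp [List.takeWhile, cutScan]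
      · simp [List.takeWhile, cutScan, hp, hm, Nat.add_comm] at ih ⊢
        exact ih

theorem toList_inj' {s t : String} (h : s.toList = t.toList) : s = t := by
  rw [← String.ofList_toList (s := s), ← String.ofList_toList (s := t), h]

-- ===== VERDICT (by name: the statement is the Claim_ definition above) =====
theorem normalize_semver_py_spec : Claim_equal_normalize_semver_py := by
  intro version_text _
  unfold Spec_normalize_semver_py normalize_semver_py normalize_semver_py_alt
  generalize (if PySem.Str.startswith (PySem.Str.strip version_text) "v" then
      PySem.Str.slice (PySem.Str.strip version_text) (some 1) none
    else PySem.Str.strip version_text) = v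
  apply toList_inj'
  have hplus : ("+" : String) = String.ofList ['+'] := rfl
  have hminus : ("-" : String) = String.ofList ['-'] := rfl
  simp only [List.foldl, hplus, hminus]
  rw [step_eq_takeWhile]
  rw [step_eq_takeWhile, takeWhile_takeWhile_eq_take_cutScan]
  rw [PySem.Str.toList_slice]
  rw [show ∀ (l : List Char) (a b : Option Int), PySem.Chars.slice l a b = PySem.List.slice l a b from fun _ _ _ => rfl]
  rw [PySem.List.slice_to_natCast]
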